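-- pv_equiv track=rewrite | github.com/Chuck1823/columbia-ai-squid-game | Utils.py | get_neighbors_by_level
-- ===== SOURCE A (Python) =====
-- def get_neighbors_by_level(pos, level):
--     x, y = pos
--
--     valid_range = lambda t: range(max(t - (1 + level), 0), min(t + (2 + level), 7))
--
--     # find all neighbors
--     neighbors = list({(a, b) for a in valid_range(x) for b in valid_range(y)} - {(x, y)})
--
--     while level != -1:
--         level -= 1
--         valid_range = lambda t: range(max(t - (1 + level), 0), min(t + (2 + level), 7))
--
--         # find all neighbors
--         prev_lvl_neighbors = list({(a, b) for a in valid_range(x) for b in valid_range(y)} - {(x, y)})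
--
--         neighbors = [i for i in neighbors if i not in prev_lvl_neighbors]
--
--     return neighbors
-- ===== SOURCE B (Python) =====
-- def get_neighbors_by_level(pos, level):
--     x, y = pos
--     outer = list({(a, b) for a in range(max(x - (1 + level), 0), min(x + (2 + level), 7))
--                          for b in range(max(y - (1 + level), 0), min(y + (2 + level), 7))} - {(x, y)})
--     inner = {(a, b) for a in range(max(x - level, 0), min(x + (1 + level), 7))
--                     for b in range(max(y - level, 0), min(y + (1 + level), 7))}
--     return [p for p in outer if p not in inner]
-- ===== Notes on version B (the rewrite author's own statement) =====
-- stated objective: simpler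
-- what changed: A's while loop, which rebuilds the neighbor square once per level and repeatedly filters, is replaced by a single subtraction: the level ring is the level square minus the one-smaller (level-1) square, using the nesting of the squares.
import Mathlib
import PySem

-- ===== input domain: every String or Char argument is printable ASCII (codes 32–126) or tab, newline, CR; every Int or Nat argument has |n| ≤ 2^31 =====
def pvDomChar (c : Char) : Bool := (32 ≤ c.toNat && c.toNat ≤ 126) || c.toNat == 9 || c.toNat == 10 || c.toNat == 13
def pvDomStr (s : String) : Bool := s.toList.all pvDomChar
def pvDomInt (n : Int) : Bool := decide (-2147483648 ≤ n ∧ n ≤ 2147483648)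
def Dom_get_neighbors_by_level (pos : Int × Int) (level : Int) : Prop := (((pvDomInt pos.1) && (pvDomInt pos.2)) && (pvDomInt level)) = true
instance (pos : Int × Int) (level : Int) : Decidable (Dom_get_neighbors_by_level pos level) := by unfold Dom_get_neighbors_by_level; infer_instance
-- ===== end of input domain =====

-- B replaces A's while loop (which repeatedly rebuilds and subtracts every smaller square)
-- by a single subtraction of the adjacent smaller square (objective: simpler).


-- ===== PORT A =====
-- A's set comprehension {(a,b) for a in valid_range(x) for b in valid_range(y)} - {(x,y)}, at a given level l
def pvA_square (x y l : Int) : PySem.Set (Int × Int) :=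
  PySem.Set.diff
    (PySem.Set.ofList
      ((PySem.List.pyRange (max (x - (1 + l)) 0) (min (x + (2 + l)) 7) 1).flatMap
        (fun a => (PySem.List.pyRange (max (y - (1 + l)) 0) (min (y + (2 + l)) 7) 1).map
          (fun b => (a, b)))))
    [(x, y)]

-- A's while loop; fuel = (level+1).toNat is exactly the number of iterations when level ≥ -1
def pvA_loop (x y : Int) (neighbors : List (Int × Int)) (level : Int) : Nat → List (Int × Int)
  | 0 => neighbors
  | fuel + 1 =>
    if level = -1 then neighbors
    else
      let level' := level - 1
      let prev := pvA_square x y level'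
      pvA_loop x y (neighbors.filter (fun i => !(prev.contains i))) level' fuel

def get_neighbors_by_level (pos : Int × Int) (level : Int) : List (Int × Int) :=
  let x := pos.1
  let y := pos.2
  let neighbors := pvA_square x y level
  pvA_loop x y neighbors level (level + 1).toNat

-- ===== PORT B =====
def get_neighbors_by_level_alt (pos : Int × Int) (level : Int) : List (Int × Int) :=
  let x := pos.1
  let y := pos.2
  let outer : PySem.Set (Int × Int) :=
    PySem.Set.diff
      (PySem.Set.ofList
        ((PySem.List.pyRange (max (x - (1 + level)) 0) (min (x + (2 + level)) 7) 1).flatMap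
          (fun a => (PySem.List.pyRange (max (y - (1 + level)) 0) (min (y + (2 + level)) 7) 1).map
            (fun b => (a, b)))))
      [(x, y)]
  let inner : PySem.Set (Int × Int) :=
    PySem.Set.ofList
      ((PySem.List.pyRange (max (x - level) 0) (min (x + (1 + level)) 7) 1).flatMap
        (fun a => (PySem.List.pyRange (max (y - level) 0) (min (y + (1 + level)) 7) 1).map
          (fun b => (a, b))))
  outer.filter (fun p => !(inner.contains p))

-- ===== PRECONDITION & SPEC =====
-- Pre_ excludes level < -1, on which A's while loop never terminates (it decrements level past -1 forever).
def Pre_get_neighbors_by_level (pos : Int × Int) (level : Int) : Prop := -1 ≤ level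
instance (pos : Int × Int) (level : Int) : Decidable (Pre_get_neighbors_by_level pos level) := by unfold Pre_get_neighbors_by_level; infer_instance
def pvWitness_get_neighbors_by_level : (Int × Int) × Int := ((3, 3), 1)

def Spec_get_neighbors_by_level (pos : Int × Int) (level : Int) (out : List (Int × Int)) : Prop := out = get_neighbors_by_level_alt pos level
instance (pos : Int × Int) (level : Int) (out : List (Int × Int)) : Decidable (Spec_get_neighbors_by_level pos level out) := by unfold Spec_get_neighbors_by_level; infer_instance

-- ===== CLAIM (what is proved, stated in full; the proofs are below) =====
def Claim_equal_get_neighbors_by_level : Prop := ∀ (pos : Int × Int) (level : Int), Dom_get_neighbors_by_level pos level → Pre_get_neighbors_by_level pos level → Spec_get_neighbors_by_level pos level (get_neighbors_by_level pos level)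

-- ===== LEMMAS AND PROOFS =====

-- the full (undiffed) square at level l, as B's `inner` builds it for l = level - 1
def pvSquare (x y l : Int) : PySem.Set (Int × Int) :=
  PySem.Set.ofList
    ((PySem.List.pyRange (max (x - (1 + l)) 0) (min (x + (2 + l)) 7) 1).flatMap
      (fun a => (PySem.List.pyRange (max (y - (1 + l)) 0) (min (y + (2 + l)) 7) 1).map
        (fun b => (a, b))))

theorem mem_pvSquare {x y l : Int} {p : Int × Int} :
    p ∈ pvSquare x y l ↔
      (max (x - (1 + l)) 0 ≤ p.1 ∧ p.1 < min (x + (2 + l)) 7) ∧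
      (max (y - (1 + l)) 0 ≤ p.2 ∧ p.2 < min (y + (2 + l)) 7) := by
  simp only [pvSquare, PySem.Set.mem_ofList, List.mem_flatMap, List.mem_map]
  constructor
  · rintro ⟨a, ha, b, hb, rfl⟩
    exact ⟨(PySem.List.mem_pyRange_one).1 ha, (PySem.List.mem_pyRange_one).1 hb⟩
  · rintro ⟨h1, h2⟩
    exact ⟨p.1, (PySem.List.mem_pyRange_one).2 h1, p.2, (PySem.List.mem_pyRange_one).2 h2, rfl⟩

theorem mem_pvA_square {x y l : Int} {p : Int × Int} :
    p ∈ pvA_square x y l ↔ p ∈ pvSquare x y l ∧ p ≠ (x, y) := by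
  simp only [pvA_square, pvSquare, PySem.Set.mem_diff, List.mem_singleton]

-- nested squares: the square one level down is contained in the current one
theorem pvSquare_mono {x y l l' : Int} (h : l ≤ l') {p : Int × Int}
    (hp : p ∈ pvSquare x y l) : p ∈ pvSquare x y l' := by
  rw [mem_pvSquare] at hp ⊢
  omega

-- the loop, run with exact fuel from level L ≥ -1, filters by the (diffed) square at level L-1
theorem pvA_loop_eq (x y : Int) (ns : List (Int × Int)) :
    ∀ (L : Int), -1 ≤ L →
      pvA_loop x y ns L (L + 1).toNat =
        ns.filter (fun p => !((pvA_square x y (L - 1)).contains p)) := by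
  intro L hL
  induction L, hL using Int.le_induction generalizing ns with
  | base =>
    have h0 : ((-1 : Int) + 1).toNat = 0 := by decide
    rw [h0]
    show ns = _
    have : pvA_square x y (-1 - 1) = [] := by
      apply List.eq_nil_iff_forall_not_mem.2
      intro p hp
      rw [mem_pvA_square, mem_pvSquare] at hp
      omega
    rw [this]
    simp [PySem.Set.contains]
  | succ L hL ih =>
    have hfuel : (L + 1 + 1).toNat = (L + 1).toNat + 1 := by omega
    rw [hfuel]
    show (if L + 1 = -1 then ns else _) = _
    rw [if_neg (by omega)]
    simp only
    have harg : L + 1 - 1 = L := by ring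
    rw [harg, ih]
    rw [List.filter_filter]
    apply List.filter_congr
    intro p _
    simp
    intro hx hp
    rw [mem_pvA_square] at hx hp
    exact hx ⟨pvSquare_mono (by omega) hp.1, hp.2⟩

theorem pvSquare_pred (x y l : Int) :
    pvSquare x y (l - 1) =
      PySem.Set.ofList
        ((PySem.List.pyRange (max (x - l) 0) (min (x + (1 + l)) 7) 1).flatMap
          (fun a => (PySem.List.pyRange (max (y - l) 0) (min (y + (1 + l)) 7) 1).map
            (fun b => (a, b)))) := by
  unfold pvSquare
  have h1 : x - (1 + (l - 1)) = x - l := by ring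
  have h2 : x + (2 + (l - 1)) = x + (1 + l) := by ring
  have h3 : y - (1 + (l - 1)) = y - l := by ring
  have h4 : y + (2 + (l - 1)) = y + (1 + l) := by ring
  rw [h1, h2, h3, h4]

-- ===== VERDICT (by name: the statement is the Claim_ definition above) =====
theorem get_neighbors_by_level_spec : Claim_equal_get_neighbors_by_level := by
  intro pos level _ hpre
  show _ = _
  unfold get_neighbors_by_level get_neighbors_by_level_alt
  simp only
  rw [pvA_loop_eq _ _ _ _ hpre, ← pvSquare_pred pos.1 pos.2 level]
  show (pvA_square pos.1 pos.2 level).filter _ =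
    (pvA_square pos.1 pos.2 level).filter
      (fun p => !((pvSquare pos.1 pos.2 (level - 1)).contains p))
  apply List.filter_congr
  intro p hp
  have hpne : p ≠ (pos.1, pos.2) := (mem_pvA_square.1 hp).2
  have key : (pvA_square pos.1 pos.2 (level - 1)).contains p
      = (pvSquare pos.1 pos.2 (level - 1)).contains p := by
    by_cases hs : p ∈ pvSquare pos.1 pos.2 (level - 1)
    · have h1 : p ∈ pvA_square pos.1 pos.2 (level - 1) := mem_pvA_square.2 ⟨hs, hpne⟩
      rw [(PySem.Set.contains_iff _ _).2 h1, (PySem.Set.contains_iff _ _).2 hs]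
    · have h1 : ¬ p ∈ pvA_square pos.1 pos.2 (level - 1) := fun h => hs (mem_pvA_square.1 h).1
      cases hc1 : (pvA_square pos.1 pos.2 (level - 1)).contains p with
      | true => exact absurd ((PySem.Set.contains_iff _ _).1 hc1) h1
      | false =>
        cases hc2 : (pvSquare pos.1 pos.2 (level - 1)).contains p with
        | true => exact absurd ((PySem.Set.contains_iff _ _).1 hc2) hs
        | false => rfl
  rw [key]
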